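-- pv_equiv track=rewrite | github.com/s4bject/tinkoff_algo | contest2/H.py | gooddays
-- ===== SOURCE A (Python) =====
-- def gooddays(nums,n):
--     min_prod = 0
--     stack = []
--     for i in range(n):
--         i_sum = 0
--         while stack and stack[-1][0] >= nums[i]:
--             j, j_sum = stack.pop()
--             min_prod = max(min_prod, j * (i_sum + j_sum))
--             i_sum += j_sum
--         stack.append([nums[i], i_sum + nums[i]])
--
--     c_sum = 0
--     while stack:
--         j, j_sum = stack.pop()
--         c_sum += j_sum
--         min_prod = max(min_prod, j * c_sum)
--     return min_prod
-- ===== SOURCE B (Python) =====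
-- def gooddays(nums, n):
--     xs = nums[:n] if n > 0 else []
--     # left table: ls[i] = sum of the maximal run of values >= xs[i] just left of i
--     ls = []
--     stack = []
--     for v in xs:
--         s = 0
--         while stack and stack[-1][0] >= v:
--             s += stack.pop()[1]
--         ls.append(s)
--         stack.append((v, s + v))
--     # right table: rs[i] = sum of the maximal run of values > xs[i] just right of i
--     rs = []
--     stack = []
--     for v in reversed(xs):
--         s = 0
--         while stack and stack[-1][0] > v:
--             s += stack.pop()[1]
--         rs.append(s)
--         stack.append((v, s + v))
--     rs.reverse()
--     best = 0
--     for v, l, r in zip(xs, ls, rs):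
--         best = max(best, v * (l + v + r))
--     return best
-- ===== Notes on version B (the rewrite author's own statement) =====
-- stated objective: alternative
-- what changed: A's single interleaved monotonic-stack pass (running span sums, max updates while popping, final flush) is replaced by two symmetric table-building passes (left sums of the >=v run and, scanning the reversed list, right sums of the >v run) followed by a separate combining max scan over zip(xs, ls, rs).
import Mathlib
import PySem

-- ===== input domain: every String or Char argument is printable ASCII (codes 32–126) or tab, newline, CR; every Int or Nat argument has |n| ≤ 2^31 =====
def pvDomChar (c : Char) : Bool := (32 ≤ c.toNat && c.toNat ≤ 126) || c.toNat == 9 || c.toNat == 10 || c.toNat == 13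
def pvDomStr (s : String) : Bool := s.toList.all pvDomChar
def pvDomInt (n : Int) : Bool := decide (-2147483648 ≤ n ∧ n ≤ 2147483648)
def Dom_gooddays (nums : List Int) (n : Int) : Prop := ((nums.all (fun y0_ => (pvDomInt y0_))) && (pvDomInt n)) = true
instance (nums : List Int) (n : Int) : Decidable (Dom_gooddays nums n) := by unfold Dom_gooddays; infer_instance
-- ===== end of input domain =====

-- B replaces A's single interleaved stack pass (running span sums + deferred max updates + final flush)
-- by two symmetric table-building passes (left ≥-run sums, right >-run sums) and a separate combining
-- max scan (objective: alternative decomposition, same O(n) cost).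

-- ===== PORT A =====
-- inner `while stack and stack[-1][0] >= nums[i]` loop: returns (stack, i_sum, min_prod)
def popA : List (Int × Int) → Int → Int → Int → List (Int × Int) × Int × Int
  | [], _, isum, mp => ([], isum, mp)
  | (j, js) :: rest, x, isum, mp =>
    if j ≥ x then popA rest x (isum + js) (max mp (j * (isum + js)))
    else ((j, js) :: rest, isum, mp)

-- final `while stack` loop: c_sum accumulator, min_prod accumulator
def flushA : List (Int × Int) → Int → Int → Int
  | [], _, mp => mp
  | (j, js) :: rest, c, mp => flushA rest (c + js) (max mp (j * (c + js)))

-- body of `for i in range(n)`: run the inner while loop, then push [nums[i], i_sum + nums[i]]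
def stepA (q : List (Int × Int) × Int) (x : Int) : List (Int × Int) × Int :=
  let r := popA q.1 x 0 q.2
  ((x, r.2.1 + x) :: r.1, r.2.2)

def gooddays (nums : List Int) (n : Int) : Int :=
  let p := (PySem.List.pyRange 0 n 1).foldl
    (fun q i => stepA q (PySem.List.pyGetD nums i 0)) ([], 0)
  flushA p.1 0 p.2

-- ===== PORT B =====
-- left pass inner while loop: pop while top value ≥ v, accumulating popped sums
def popB1 : List (Int × Int) → Int → Int → List (Int × Int) × Int
  | [], _, s => ([], s)
  | (u, w) :: rest, v, s => if u ≥ v then popB1 rest v (s + w) else ((u, w) :: rest, s)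

-- left pass: ls[i] = sum of the maximal run of values ≥ xs[i] immediately left of i
def passL : List Int → List (Int × Int) → List Int
  | [], _ => []
  | v :: r, st =>
    let p := popB1 st v 0
    p.2 :: passL r ((v, p.2 + v) :: p.1)

-- right pass inner while loop: pop while top value > v
def popB2 : List (Int × Int) → Int → Int → List (Int × Int) × Int
  | [], _, s => ([], s)
  | (u, w) :: rest, v, s => if u > v then popB2 rest v (s + w) else ((u, w) :: rest, s)

-- right pass (run over reversed xs): rs[i] = sum of the maximal run of values > xs[i] right of i
def passR : List Int → List (Int × Int) → List Int
  | [], _ => []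
  | v :: r, st =>
    let p := popB2 st v 0
    p.2 :: passR r ((v, p.2 + v) :: p.1)

-- final scan: best = max(best, v * (l + v + r)) over zip(xs, ls, rs)
def combineB : List (Int × (Int × Int)) → Int → Int
  | [], best => best
  | (v, l, r) :: t, best => combineB t (max best (v * (l + v + r)))

def gooddays_alt (nums : List Int) (n : Int) : Int :=
  let xs := if 0 < n then PySem.List.slice nums none (some n) else []
  let ls := passL xs []
  let rs := (passR xs.reverse []).reverse
  combineB (xs.zip (ls.zip rs)) 0

-- ===== PRECONDITION & SPEC =====
-- Pre_ excludes exactly n > len(nums), where A's nums[i] raises IndexError (B still returns a value there).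
def Pre_gooddays (nums : List Int) (n : Int) : Prop := n ≤ (nums.length : Int)
instance (nums : List Int) (n : Int) : Decidable (Pre_gooddays nums n) := by
  unfold Pre_gooddays; infer_instance

def pvWitness_gooddays : List Int × Int := ([2, 1, 3], 3)

def Spec_gooddays (nums : List Int) (n : Int) (out : Int) : Prop := out = gooddays_alt nums n
instance (nums : List Int) (n : Int) (out : Int) : Decidable (Spec_gooddays nums n out) := by
  unfold Spec_gooddays; infer_instance

-- ===== CLAIM (what is proved, stated in full; the proofs are below) =====
def Claim_equal_gooddays : Prop := ∀ (nums : List Int) (n : Int), Dom_gooddays nums n → Pre_gooddays nums n → Spec_gooddays nums n (gooddays nums n)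

-- ===== LEMMAS AND PROOFS =====

-- the common spec both programs are reduced to: for each split xs = rev pre ++ [v] ++ bs,
-- candidate v * (sum of the ≥v-run at the front of pre + v + sum of the >v-run at the front of bs),
-- where list entries are (value, weight) pairs
def wGE : List (Int × Int) → Int → Int
  | [], _ => 0
  | (u, w) :: r, v => if u ≥ v then w + wGE r v else 0

def wGT : List (Int × Int) → Int → Int
  | [], _ => 0
  | (u, w) :: r, v => if u > v then w + wGT r v else 0

def futS : List (Int × Int) → List (Int × Int) → Int → Int
  | _, [], acc => acc
  | pre, (v, w) :: bs, acc => futS ((v, w) :: pre) bs (max acc (v * (wGE pre v + w + wGT bs v)))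

def diagW (xs : List Int) : List (Int × Int) := xs.map (fun x => (x, x))

def sumSnd (l : List (Int × Int)) : Int := (l.map Prod.snd).sum

-- candidates emitted by A's inner pop loop
def pcands : List (Int × Int) → Int → Int → Int → Int
  | [], _, _, mp => mp
  | (j, js) :: r, v, isum, mp =>
    if j ≥ v then pcands r v (isum + js) (max mp (j * (isum + js))) else mp

-- candidates still pending in A's stack, given the remaining items
def scnd : List (Int × Int) → Int → List (Int × Int) → Int → Int
  | [], _, _, mp => mp
  | (j, js) :: r, ab, items, mp => scnd r (ab + js) items (max mp (j * ((ab + js) + wGT items j)))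

-- A's whole run (weighted generalisation: pushed weight comes from the item, not the value)
def stepW (q : List (Int × Int) × Int) (it : Int × Int) : List (Int × Int) × Int :=
  let r := popA q.1 it.1 0 q.2
  ((it.1, r.2.1 + it.2) :: r.1, r.2.2)

def runW (st : List (Int × Int)) (mp : Int) (items : List (Int × Int)) : Int :=
  let p := items.foldl stepW (st, mp)
  flushA p.1 0 p.2

def DecrS (st : List (Int × Int)) : Prop := st.Pairwise (fun a b => b.1 < a.1)

lemma diagW_cons (x : Int) (xs : List Int) : diagW (x :: xs) = (x, x) :: diagW xs := rfl

-- ---- pop-loop characterisations ----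
lemma popA_spec (st : List (Int × Int)) (x : Int) : ∀ (isum mp : Int),
    popA st x isum mp =
      (st.dropWhile (fun p => decide (x ≤ p.1)), isum + wGE st x, pcands st x isum mp) := by
  induction st with
  | nil => intro isum mp; simp [popA, wGE, pcands, List.dropWhile]
  | cons p rest ih =>
    intro isum mp
    obtain ⟨j, js⟩ := p
    by_cases h : x ≤ j
    · simp [popA, wGE, pcands, List.dropWhile, h, ih, add_assoc]
    · simp [popA, wGE, pcands, List.dropWhile, h]

lemma popB1_spec (st : List (Int × Int)) (v : Int) : ∀ (s : Int),
    popB1 st v s = (st.dropWhile (fun p => decide (v ≤ p.1)), s + wGE st v) := by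
  induction st with
  | nil => intro s; simp [popB1, wGE, List.dropWhile]
  | cons p rest ih =>
    intro s
    obtain ⟨u, w⟩ := p
    by_cases h : v ≤ u
    · simp [popB1, wGE, List.dropWhile, h, ih, add_assoc]
    · simp [popB1, wGE, List.dropWhile, h]

lemma popB2_spec (st : List (Int × Int)) (v : Int) : ∀ (s : Int),
    popB2 st v s = (st.dropWhile (fun p => decide (v < p.1)), s + wGT st v) := by
  induction st with
  | nil => intro s; simp [popB2, wGT, List.dropWhile]
  | cons p rest ih =>
    intro s
    obtain ⟨u, w⟩ := p
    by_cases h : v < u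
    · simp [popB2, wGT, List.dropWhile, h, ih, add_assoc]
    · simp [popB2, wGT, List.dropWhile, h]

lemma wGE_takeWhile (st : List (Int × Int)) (v : Int) :
    wGE st v = sumSnd (st.takeWhile (fun p => decide (v ≤ p.1))) := by
  induction st with
  | nil => simp [wGE, sumSnd]
  | cons p rest ih =>
    obtain ⟨j, js⟩ := p
    by_cases h : v ≤ j
    · simp [wGE, List.takeWhile, sumSnd, h, ih]
    · simp [wGE, List.takeWhile, sumSnd, h]

lemma wGT_takeWhile (st : List (Int × Int)) (v : Int) :
    wGT st v = sumSnd (st.takeWhile (fun p => decide (v < p.1))) := by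
  induction st with
  | nil => simp [wGT, sumSnd]
  | cons p rest ih =>
    obtain ⟨j, js⟩ := p
    by_cases h : v < j
    · simp [wGT, List.takeWhile, sumSnd, h, ih]
    · simp [wGT, List.takeWhile, sumSnd, h]

lemma pcands_dropWhile (st : List (Int × Int)) (v : Int) : ∀ (ab acc : Int),
    pcands (st.dropWhile (fun p => decide (v ≤ p.1))) v ab acc = acc := by
  induction st with
  | nil => intro ab acc; simp [pcands, List.dropWhile]
  | cons p rest ih =>
    intro ab acc
    obtain ⟨j, js⟩ := p
    by_cases h : v ≤ j
    · simp [List.dropWhile, h, ih]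
    · simp [List.dropWhile, pcands, h]

lemma flushA_eq_scnd (st : List (Int × Int)) : ∀ (c mp : Int),
    flushA st c mp = scnd st c [] mp := by
  induction st with
  | nil => intro c mp; rfl
  | cons p rest ih =>
    intro c mp
    obtain ⟨j, js⟩ := p
    simp [flushA, scnd, wGT, ih]

lemma scnd_max (items : List (Int × Int)) (c : Int) : ∀ (st : List (Int × Int)) (ab a : Int),
    scnd st ab items (max a c) = max (scnd st ab items a) c := by
  intro st
  induction st with
  | nil => intro ab a; rfl
  | cons p rest ih =>
    intro ab a
    obtain ⟨j, js⟩ := p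
    simp only [scnd]
    rw [max_right_comm]
    exact ih _ _

-- ---- context replacement: merging a popped run into the pushed weight is invisible ----
lemma wGE_append_of_all (u : Int) : ∀ (pop keep : List (Int × Int)), (∀ p ∈ pop, u ≤ p.1) →
    wGE (pop ++ keep) u = sumSnd pop + wGE keep u := by
  intro pop
  induction pop with
  | nil => intro keep _; simp [sumSnd]
  | cons p rest ih =>
    intro keep h
    obtain ⟨j, js⟩ := p
    have hj : u ≤ j := h (j, js) List.mem_cons_self
    simp [wGE, sumSnd, hj, ih keep (fun q hq => h q (List.mem_cons_of_mem _ hq))]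
    ring

lemma wGT_append_of_all (u : Int) : ∀ (pop keep : List (Int × Int)), (∀ p ∈ pop, u < p.1) →
    wGT (pop ++ keep) u = sumSnd pop + wGT keep u := by
  intro pop
  induction pop with
  | nil => intro keep _; simp [sumSnd]
  | cons p rest ih =>
    intro keep h
    obtain ⟨j, js⟩ := p
    have hj : u < j := h (j, js) List.mem_cons_self
    simp [wGT, sumSnd, hj, ih keep (fun q hq => h q (List.mem_cons_of_mem _ hq))]
    ring

lemma wGE_ctx (v w : Int) (pop keep : List (Int × Int))
    (hpop : ∀ p ∈ pop, v ≤ p.1) :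
    ∀ (pre : List (Int × Int)) (u : Int),
      wGE (pre ++ (v, w) :: (pop ++ keep)) u = wGE (pre ++ (v, sumSnd pop + w) :: keep) u := by
  intro pre u
  induction pre with
  | nil =>
    simp only [List.nil_append, wGE]
    by_cases h : u ≤ v
    · rw [if_pos h, if_pos h, wGE_append_of_all u pop keep (fun q hq => le_trans h (hpop q hq))]
      ring
    · rw [if_neg h, if_neg h]
  | cons q pre ih =>
    obtain ⟨a, b⟩ := q
    simp only [List.cons_append, wGE]
    rw [ih]

lemma wGT_ctx (v w : Int) (pop keep : List (Int × Int))
    (hpop : ∀ p ∈ pop, v < p.1) :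
    ∀ (pre : List (Int × Int)) (u : Int),
      wGT (pre ++ (v, w) :: (pop ++ keep)) u = wGT (pre ++ (v, sumSnd pop + w) :: keep) u := by
  intro pre u
  induction pre with
  | nil =>
    simp only [List.nil_append, wGT]
    by_cases h : u < v
    · rw [if_pos h, if_pos h, wGT_append_of_all u pop keep (fun q hq => lt_trans h (hpop q hq))]
      ring
    · rw [if_neg h, if_neg h]
  | cons q pre ih =>
    obtain ⟨a, b⟩ := q
    simp only [List.cons_append, wGT]
    rw [ih]

lemma futS_ctx (v w : Int) (pop keep : List (Int × Int))
    (hpop : ∀ p ∈ pop, v ≤ p.1) :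
    ∀ (rest : List (Int × Int)) (pre : List (Int × Int)) (acc : Int),
      futS (pre ++ (v, w) :: (pop ++ keep)) rest acc
        = futS (pre ++ (v, sumSnd pop + w) :: keep) rest acc := by
  intro rest
  induction rest with
  | nil => intro pre acc; rfl
  | cons it rest ih =>
    intro pre acc
    obtain ⟨x, y⟩ := it
    simp only [futS]
    rw [wGE_ctx v w pop keep hpop pre x, ← List.cons_append, ← List.cons_append]
    exact ih _ _

-- ---- stack-shape facts ----
lemma dropWhile_lt (v : Int) : ∀ (st : List (Int × Int)), DecrS st →
    ∀ p ∈ st.dropWhile (fun p => decide (v ≤ p.1)), p.1 < v := by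
  intro st
  induction st with
  | nil => intro _ p hp; simp [List.dropWhile] at hp
  | cons q r ih =>
    intro h p hp
    rcases List.pairwise_cons.mp h with ⟨hq, hr⟩
    by_cases hc : v ≤ q.1
    · rw [List.dropWhile_cons_of_pos (by simpa using hc)] at hp
      exact ih hr p hp
    · rw [List.dropWhile_cons_of_neg (by simpa using hc)] at hp
      rcases List.mem_cons.mp hp with rfl | hp'
      · exact not_le.mp hc
      · exact lt_trans (hq p hp') (not_le.mp hc)

lemma decrS_push (v w : Int) (st : List (Int × Int)) (h : DecrS st) :
    DecrS ((v, w) :: st.dropWhile (fun p => decide (v ≤ p.1))) := by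
  unfold DecrS
  rw [List.pairwise_cons]
  exact ⟨fun p hp => dropWhile_lt v st h p hp, h.sublist (List.dropWhile_sublist _)⟩

-- ---- scnd bookkeeping across one step of A ----
lemma scnd_skip_item (v w : Int) : ∀ (keep : List (Int × Int)) (ab acc : Int)
    (rest : List (Int × Int)), (∀ p ∈ keep, p.1 < v) →
    scnd keep ab ((v, w) :: rest) acc = scnd keep (ab + w) rest acc := by
  intro keep
  induction keep with
  | nil => intro ab acc rest _; rfl
  | cons q r ih =>
    intro ab acc rest h
    obtain ⟨j, js⟩ := q
    have hj : j < v := h (j, js) List.mem_cons_self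
    simp only [scnd]
    have hw : wGT ((v, w) :: rest) j = w + wGT rest j := by
      simp only [wGT]; rw [if_pos hj]
    rw [hw, ih (ab + js) _ rest (fun p hp => h p (List.mem_cons_of_mem _ hp))]
    have e1 : ab + js + w = ab + w + js := by ring
    have e2 : ab + js + (w + wGT rest j) = ab + w + js + wGT rest j := by ring
    rw [e1, e2]

lemma scnd_pop_split (v w : Int) (rest : List (Int × Int)) :
    ∀ (pop keep : List (Int × Int)) (ab acc : Int),
      (∀ p ∈ pop, v ≤ p.1) →
      (∀ ab' acc', pcands keep v ab' acc' = acc') →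
      scnd (pop ++ keep) ab ((v, w) :: rest) acc
        = scnd keep (ab + sumSnd pop) ((v, w) :: rest) (pcands (pop ++ keep) v ab acc) := by
  intro pop
  induction pop with
  | nil =>
    intro keep ab acc _ h2
    simp [sumSnd, h2]
  | cons q pop' ih =>
    intro keep ab acc h1 h2
    obtain ⟨j, js⟩ := q
    have hj : v ≤ j := h1 (j, js) List.mem_cons_self
    simp only [List.cons_append, scnd, pcands]
    have hw : wGT ((v, w) :: rest) j = 0 := by
      simp only [wGT]; rw [if_neg (by omega)]
    rw [hw, if_pos hj, add_zero]
    rw [ih keep (ab + js) _ (fun p hp => h1 p (List.mem_cons_of_mem _ hp)) h2]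
    have e1 : ab + js + sumSnd pop' = ab + sumSnd ((j, js) :: pop') := by
      simp [sumSnd]; ring
    rw [e1]

-- ---- the key one-step accounting ----
lemma step_key (v w mp : Int) (rest : List (Int × Int)) (st pop keep : List (Int × Int))
    (hsp : pop ++ keep = st)
    (hmem : ∀ p ∈ pop, v ≤ p.1) (hlt : ∀ p ∈ keep, p.1 < v)
    (hstop : ∀ ab acc, pcands keep v ab acc = acc) :
    futS ((v, (0 + wGE st v) + w) :: keep) rest
        (scnd ((v, (0 + wGE st v) + w) :: keep) 0 rest (pcands st v 0 mp))
      = futS st ((v, w) :: rest) (scnd st 0 ((v, w) :: rest) mp) := by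
  subst hsp
  have hkeep0 : wGE keep v = 0 := by
    cases keep with
    | nil => rfl
    | cons q r =>
      obtain ⟨j, js⟩ := q
      have : j < v := hlt (j, js) List.mem_cons_self
      simp only [wGE]; rw [if_neg (by omega)]
  have hS : wGE (pop ++ keep) v = sumSnd pop := by
    rw [wGE_append_of_all v pop keep hmem, hkeep0, add_zero]
  -- unfold the RHS one step
  conv_rhs => rw [futS]
  -- rewrite the RHS accumulator
  rw [scnd_pop_split v w rest pop keep 0 mp hmem hstop,
      scnd_skip_item v w keep _ _ rest hlt]
  -- unfold the LHS scnd one step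
  simp only [scnd]
  rw [← scnd_max]
  -- align the two accumulators and stacks
  rw [hS]
  have e1 : (0 : Int) + sumSnd pop + w = sumSnd pop + w := by ring
  rw [e1]
  -- now the futS contexts
  have hctx := futS_ctx v w pop keep hmem rest []
  simp only [List.nil_append] at hctx
  rw [hctx]
  simp only [zero_add]

-- ---- main theorem about A's pass ----
lemma runW_eq_futS : ∀ (items : List (Int × Int)) (st : List (Int × Int)) (mp : Int),
    DecrS st → runW st mp items = futS st items (scnd st 0 items mp) := by
  intro items
  induction items with
  | nil =>
    intro st mp _
    simp only [runW, List.foldl_nil, futS]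
    exact flushA_eq_scnd st 0 mp
  | cons it rest ih =>
    intro st mp hst
    obtain ⟨v, w⟩ := it
    have h1 : runW st mp ((v, w) :: rest)
        = runW ((v, (0 + wGE st v) + w) :: st.dropWhile (fun p => decide (v ≤ p.1)))
            (pcands st v 0 mp) rest := by
      simp only [runW, List.foldl_cons, stepW, popA_spec]
    rw [h1, ih _ _ (decrS_push v _ st hst)]
    exact step_key v w mp rest st _ _
      (List.takeWhile_append_dropWhile)
      (fun p hp => by simpa using List.mem_takeWhile_imp hp)
      (dropWhile_lt v st hst)
      (pcands_dropWhile st v)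

-- ---- B's passes compute the spec tables ----
def smGE : List (Int × Int) → List Int → List Int
  | _, [] => []
  | pre, v :: r => wGE pre v :: smGE ((v, v) :: pre) r

def smGT : List (Int × Int) → List Int → List Int
  | _, [] => []
  | pre, v :: r => wGT pre v :: smGT ((v, v) :: pre) r

def rmGT : List Int → List Int
  | [] => []
  | v :: r => wGT (diagW r) v :: rmGT r

lemma smGE_ctx (v w : Int) (pop keep : List (Int × Int))
    (hpop : ∀ p ∈ pop, v ≤ p.1) :
    ∀ (r : List Int) (pre : List (Int × Int)),
      smGE (pre ++ (v, w) :: (pop ++ keep)) r = smGE (pre ++ (v, sumSnd pop + w) :: keep) r := by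
  intro r
  induction r with
  | nil => intro pre; rfl
  | cons u r' ih =>
    intro pre
    simp only [smGE]
    rw [wGE_ctx v w pop keep hpop pre u]
    exact congrArg _ (ih ((u, u) :: pre))

lemma smGT_ctx (v w : Int) (pop keep : List (Int × Int))
    (hpop : ∀ p ∈ pop, v < p.1) :
    ∀ (r : List Int) (pre : List (Int × Int)),
      smGT (pre ++ (v, w) :: (pop ++ keep)) r = smGT (pre ++ (v, sumSnd pop + w) :: keep) r := by
  intro r
  induction r with
  | nil => intro pre; rfl
  | cons u r' ih =>
    intro pre
    simp only [smGT]
    rw [wGT_ctx v w pop keep hpop pre u]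
    exact congrArg _ (ih ((u, u) :: pre))

lemma passL_spec : ∀ (xs : List Int) (st : List (Int × Int)),
    passL xs st = smGE st xs := by
  intro xs
  induction xs with
  | nil => intro st; rfl
  | cons v r ih =>
    intro st
    simp only [passL, popB1_spec, zero_add]
    rw [ih]
    have h2 := smGE_ctx v v (st.takeWhile (fun p => decide (v ≤ p.1)))
      (st.dropWhile (fun p => decide (v ≤ p.1)))
      (fun p hp => by simpa using List.mem_takeWhile_imp hp) r []
    simp only [List.nil_append, List.takeWhile_append_dropWhile] at h2
    rw [← wGE_takeWhile st v] at h2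
    simp only [smGE]
    rw [← h2]

lemma passR_spec : ∀ (xs : List Int) (st : List (Int × Int)),
    passR xs st = smGT st xs := by
  intro xs
  induction xs with
  | nil => intro st; rfl
  | cons v r ih =>
    intro st
    simp only [passR, popB2_spec, zero_add]
    rw [ih]
    have h2 := smGT_ctx v v (st.takeWhile (fun p => decide (v < p.1)))
      (st.dropWhile (fun p => decide (v < p.1)))
      (fun p hp => by simpa using List.mem_takeWhile_imp hp) r []
    simp only [List.nil_append, List.takeWhile_append_dropWhile] at h2
    rw [← wGT_takeWhile st v] at h2
    simp only [smGT]
    rw [← h2]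

lemma smGT_append (bs : List Int) : ∀ (as : List Int) (pre : List (Int × Int)),
    smGT pre (as ++ bs) = smGT pre as ++ smGT (diagW as.reverse ++ pre) bs := by
  intro as
  induction as with
  | nil => intro pre; simp [smGT, diagW]
  | cons a as' ih =>
    intro pre
    simp only [List.cons_append, smGT]
    rw [ih ((a, a) :: pre)]
    have : diagW as'.reverse ++ ((a, a) :: pre) = diagW (a :: as').reverse ++ pre := by
      simp [diagW, List.map_append, List.append_assoc]
    rw [this]

lemma rev_smGT_rev (xs : List Int) :
    (smGT [] xs.reverse).reverse = rmGT xs := by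
  induction xs with
  | nil => rfl
  | cons v r ih =>
    rw [List.reverse_cons, smGT_append [v] r.reverse []]
    simp only [List.append_nil, List.reverse_reverse]
    rw [List.reverse_append]
    simp only [smGT, List.reverse_cons, List.reverse_nil, List.nil_append]
    rw [ih]
    rfl

lemma combineB_eq_futS : ∀ (xs : List Int) (pre : List (Int × Int)) (best : Int),
    combineB (xs.zip ((smGE pre xs).zip (rmGT xs))) best = futS pre (diagW xs) best := by
  intro xs
  induction xs with
  | nil => intro pre best; rfl
  | cons v r ih =>
    intro pre best
    simp only [smGE, rmGT, diagW_cons, List.zip_cons_cons, combineB, futS]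
    exact ih _ _

-- ---- assembling both sides ----
lemma gooddays_eq_futS (nums : List Int) (n : Int) (h0 : 0 < n) (hn : n ≤ (nums.length : Int)) :
    gooddays nums n = futS [] (diagW (nums.take n.toNat)) 0 := by
  have hlen : (((nums.take n.toNat).length : Nat) : Int) = n := by
    simp [List.length_take]; omega
  simp only [gooddays]
  have hcg := PySem.List.foldl_congr_mem (PySem.List.pyRange 0 n 1)
    (fun (q : List (Int × Int) × Int) i => stepA q (PySem.List.pyGetD nums i 0))
    (fun q i => stepA q (PySem.List.pyGetD (nums.take n.toNat) i 0))
    ([], 0)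
    (by
      intro acc i hi
      rcases (PySem.List.mem_pyRange_one).mp hi with ⟨hi0, hin⟩
      show stepA acc (PySem.List.pyGetD nums i 0)
          = stepA acc (PySem.List.pyGetD (nums.take n.toNat) i 0)
      rw [PySem.List.pyGetD_eq_getElem nums 0 hi0 (by omega),
          PySem.List.pyGetD_eq_getElem (nums.take n.toNat) 0 hi0 (by omega),
          List.getElem_take])
  rw [hcg]
  generalize hg : nums.take n.toNat = xs'
  rw [hg] at hlen
  rw [← hlen]
  rw [PySem.List.foldl_pyRange_zero_pyGetD' xs' 0 stepA ([], 0)]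
  have hmap : xs'.foldl stepA ([], 0) = (diagW xs').foldl stepW ([], 0) := by
    rw [diagW, List.foldl_map]
    rfl
  rw [hmap]
  have hrw := runW_eq_futS (diagW xs') [] 0 List.Pairwise.nil
  simp only [runW, scnd] at hrw
  exact hrw

lemma gooddays_alt_eq_futS (nums : List Int) (n : Int) (h0 : 0 < n) :
    gooddays_alt nums n = futS [] (diagW (nums.take n.toNat)) 0 := by
  simp only [gooddays_alt, if_pos h0]
  rw [PySem.List.slice_to nums (le_of_lt h0)]
  rw [passL_spec, passR_spec, rev_smGT_rev, combineB_eq_futS]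

-- ===== VERDICT (by name: the statement is the Claim_ definition above) =====
theorem gooddays_spec : Claim_equal_gooddays := by
  intro nums n _ hpre
  unfold Spec_gooddays
  unfold Pre_gooddays at hpre
  by_cases h0 : 0 < n
  · rw [gooddays_eq_futS nums n h0 hpre, gooddays_alt_eq_futS nums n h0]
  · simp [gooddays, gooddays_alt, PySem.List.pyRange_one_eq_nil (by omega : n ≤ (0 : Int)),
      flushA, passL, passR, combineB, if_neg h0]
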